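-- pv_equiv track=rewrite | github.com/asancto91/AOC | AOC24/def count_possible_designs(towel_pattern.py | count_possible_designs
-- ===== SOURCE A (Python) =====
-- def count_possible_designs(towel_patterns, designs):
--     towel_set = set(towel_patterns)
--     possible_count = 0
--
--     for design in designs:
--         n = len(design)
--         dp = [False] * (n + 1)
--         dp[0] = True
--
--         for i in range(1, n + 1):
--             for towel in towel_set:
--                 towel_length = len(towel)
--                 if i >= towel_length and design[i-towel_length:i] == towel:
--                     if dp[i-towel_length]:
--                         dp[i] = True
--                         break
--
--         if dp[n]:
--             possible_count += 1
--
--     return possible_count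
-- ===== SOURCE B (Python) =====
-- def count_possible_designs(towel_patterns, designs):
--     # Forward "push" reachability over cut positions; the towel list is replaced
--     # by a hash set of patterns indexed by the distinct pattern lengths, so each
--     # position does one set lookup per distinct length instead of a scan over all towels.
--     pats = set(t for t in towel_patterns if t)
--     lengths = sorted(set(len(t) for t in pats))
--     possible_count = 0
--     for design in designs:
--         n = len(design)
--         reach = {0}
--         for i in range(n):
--             if i in reach:
--                 for l in lengths:
--                     if i + l <= n and design[i:i+l] in pats:
--                         reach.add(i + l)
--         if n in reach:
--             possible_count += 1
--     return possible_count
-- ===== Notes on version B (the rewrite author's own statement) =====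
-- stated objective: faster
-- what changed: Replaces A's backward pull-DP (for each position, scan every towel and compare a suffix slice against it) by forward push reachability over a set of cut positions, with the towel list replaced by a hash set queried once per distinct pattern length, so the per-position scan over all towels disappears.
import Mathlib
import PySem

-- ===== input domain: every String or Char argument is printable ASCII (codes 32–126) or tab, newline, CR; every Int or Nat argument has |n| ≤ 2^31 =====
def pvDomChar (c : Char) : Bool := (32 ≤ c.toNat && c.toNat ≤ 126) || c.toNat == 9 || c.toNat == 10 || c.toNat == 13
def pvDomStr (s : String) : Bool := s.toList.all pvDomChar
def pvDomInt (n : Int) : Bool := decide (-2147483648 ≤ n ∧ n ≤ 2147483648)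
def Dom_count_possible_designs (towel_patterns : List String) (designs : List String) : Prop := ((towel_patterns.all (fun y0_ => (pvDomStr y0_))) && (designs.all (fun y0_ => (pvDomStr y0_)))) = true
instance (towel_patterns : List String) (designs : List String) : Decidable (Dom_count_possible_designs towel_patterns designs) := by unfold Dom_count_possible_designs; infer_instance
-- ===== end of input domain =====

-- B replaces A's backward per-position scan over all towels (slice-compare each as a suffix at each i)
-- by forward push reachability over a set of cut positions, with a hash set of patterns queried once per
-- distinct pattern length (objective: faster; a timing run measured B faster on large inputs).

-- ===== PORT A =====
-- inner 'for towel in towel_set: … break' loop of A (break = return from the recursion)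
def pvATowelLoop (cs : List Char) (i : Int) (dp : List Bool) : List String → List Bool
  | [] => dp
  | t :: rest =>
    let tl : Int := PySem.Str.len t
    if tl ≤ i ∧ PySem.List.slice cs (some (i - tl)) (some i) = t.toList then
      if PySem.List.pyGetD dp (i - tl) false then PySem.List.pySetD dp i true
      else pvATowelLoop cs i dp rest
    else pvATowelLoop cs i dp rest

-- body of A's 'for design in designs' loop: is dp[n] true for this design?
def pvADesign (tset : List String) (design : String) : Bool :=
  PySem.List.pyGetD
    ((PySem.List.pyRange 1 (PySem.Str.len design + 1) 1).foldl
      (fun dp i => pvATowelLoop design.toList i dp tset)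
      (PySem.List.pySetD (PySem.List.pyRepeat [false] (PySem.Str.len design + 1)) 0 true))
    (PySem.Str.len design) false

def count_possible_designs (towel_patterns : List String) (designs : List String) : Int :=
  let tset : PySem.Set String := PySem.Set.ofList towel_patterns
  designs.foldl (fun possible_count design =>
    if pvADesign tset design then possible_count + 1 else possible_count) 0

-- ===== PORT B =====
-- inner 'for l in lengths' loop of B: one hash-set lookup of the l-char slice at i per distinct length
-- (design[i:i+l] with 0 ≤ i is exactly (cs.drop i).take l)
def pvBLenLoop (pats : PySem.Set String) (cs : List Char) (i : Nat) (reach : PySem.Set Nat) : List Nat → PySem.Set Nat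
  | [] => reach
  | l :: rest =>
    pvBLenLoop pats cs i
      (if i + l ≤ cs.length ∧ PySem.Set.contains pats (String.ofList ((cs.drop i).take l)) = true
        then PySem.Set.add reach (i + l) else reach)
      rest

-- body of B's 'for design in designs' loop ('for i in range(n)' is the fold over List.range n, n = len(design) ≥ 0)
def pvBDesign (pats : PySem.Set String) (lengths : List Nat) (design : String) : Bool :=
  PySem.Set.contains
    ((List.range design.toList.length).foldl
      (fun r i => if PySem.Set.contains r i then pvBLenLoop pats design.toList i r lengths else r)
      (PySem.Set.ofList [0]))
    design.toList.length

def count_possible_designs_alt (towel_patterns : List String) (designs : List String) : Int :=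
  let pats : PySem.Set String := PySem.Set.ofList (towel_patterns.filter (fun t => t ≠ ""))
  let lengths : List Nat := PySem.List.sorted (PySem.Set.ofList (pats.map (fun t => t.toList.length))) (fun x => x) false
  designs.foldl (fun possible_count design =>
    if pvBDesign pats lengths design then possible_count + 1 else possible_count) 0

-- ===== PRECONDITION & SPEC =====
def Spec_count_possible_designs (towel_patterns : List String) (designs : List String) (out : Int) : Prop := out = count_possible_designs_alt towel_patterns designs
instance (towel_patterns : List String) (designs : List String) (out : Int) : Decidable (Spec_count_possible_designs towel_patterns designs out) := by unfold Spec_count_possible_designs; infer_instance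

-- ===== CLAIM (what is proved, stated in full; the proofs are below) =====
def Claim_equal_count_possible_designs : Prop := ∀ (towel_patterns : List String) (designs : List String), Dom_count_possible_designs towel_patterns designs → Spec_count_possible_designs towel_patterns designs (count_possible_designs towel_patterns designs)

-- ===== LEMMAS AND PROOFS =====

-- cut position j of cs is reachable by concatenating nonempty towels from tps
inductive pvReach (tps : List String) (cs : List Char) : Nat → Prop
  | zero : pvReach tps cs 0
  | step (i : Nat) (t : String) (hr : pvReach tps cs i) (ht : t ∈ tps) (hne : t.toList ≠ [])
      (hp : t.toList <+: cs.drop i) : pvReach tps cs (i + t.toList.length)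

-- reachable via a chain all of whose step start positions are < m
inductive pvReachVia (tps : List String) (cs : List Char) (m : Nat) : Nat → Prop
  | zero : pvReachVia tps cs m 0
  | step (i : Nat) (t : String) (hr : pvReachVia tps cs m i) (him : i < m) (ht : t ∈ tps)
      (hne : t.toList ≠ []) (hp : t.toList <+: cs.drop i) : pvReachVia tps cs m (i + t.toList.length)

theorem pvReach_inv (tps : List String) (cs : List Char) (j : Nat) (hj : 0 < j) (h : pvReach tps cs j) :
    ∃ t ∈ tps, t.toList ≠ [] ∧ t.toList.length ≤ j ∧ t.toList <+: cs.drop (j - t.toList.length) ∧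
      pvReach tps cs (j - t.toList.length) := by
  cases h with
  | zero => omega
  | step i t hr ht hne hp =>
    refine ⟨t, ht, hne, by omega, ?_, ?_⟩ <;> simp only [Nat.add_sub_cancel] <;> assumption

theorem pvReachVia_mono (tps : List String) (cs : List Char) (m m' j : Nat) (hmm : m ≤ m')
    (h : pvReachVia tps cs m j) : pvReachVia tps cs m' j := by
  induction h with
  | zero => exact .zero
  | step i t hr him ht hne hp ih => exact .step i t ih (by omega) ht hne hp

theorem pvReachVia_self (tps : List String) (cs : List Char) (m j : Nat)
    (h : pvReachVia tps cs m j) : pvReachVia tps cs j j := by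
  induction h with
  | zero => exact .zero
  | step i t hr him ht hne hp ih =>
    have hlen : 0 < t.toList.length := List.length_pos_of_ne_nil hne
    exact .step i t (pvReachVia_mono tps cs i (i + t.toList.length) i (by omega) ih) (by omega) ht hne hp

theorem pvReachVia_zero_iff (tps : List String) (cs : List Char) (j : Nat) :
    pvReachVia tps cs 0 j ↔ j = 0 := by
  constructor
  · intro h; cases h with
    | zero => rfl
    | step i t hr him ht hne hp => omega
  · rintro rfl; exact .zero

theorem pvReachVia_length_iff (tps : List String) (cs : List Char) (j : Nat) :
    pvReachVia tps cs cs.length j ↔ pvReach tps cs j := by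
  constructor
  · intro h
    induction h with
    | zero => exact .zero
    | step i t hr him ht hne hp ih => exact .step i t ih ht hne hp
  · intro h
    induction h with
    | zero => exact .zero
    | step i t hr ht hne hp ih =>
      have hd : cs.drop i ≠ [] := by
        intro hnil; rw [hnil] at hp; exact hne (List.prefix_nil.mp hp)
      have : i < cs.length := by
        by_contra hle
        exact hd (List.drop_eq_nil_of_le (by omega))
      exact .step i t ih this ht hne hp

theorem pvReachVia_succ_iff (tps : List String) (cs : List Char) (i j : Nat) :
    pvReachVia tps cs (i + 1) j ↔
      pvReachVia tps cs i j ∨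
        (pvReachVia tps cs i i ∧ ∃ t ∈ tps, t.toList ≠ [] ∧ t.toList <+: cs.drop i ∧ j = i + t.toList.length) := by
  constructor
  · intro h
    cases h with
    | zero => exact Or.inl .zero
    | step p t hr him ht hne hp =>
      have hpp : pvReachVia tps cs p p := pvReachVia_self tps cs (i + 1) p hr
      by_cases hpi : p = i
      · subst hpi
        exact Or.inr ⟨hpp, t, ht, hne, hp, rfl⟩
      · exact Or.inl (.step p t (pvReachVia_mono tps cs p i p (by omega) hpp) (by omega) ht hne hp)
  · rintro (h | ⟨hii, t, ht, hne, hp, rfl⟩)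
    · exact pvReachVia_mono tps cs i (i + 1) j (by omega) h
    · exact .step i t (pvReachVia_mono tps cs i (i + 1) i (by omega) hii) (by omega) ht hne hp

-- ---------- A side ----------

theorem pvATowelLoop_eq (cs : List Char) (i : Int) (dp : List Bool) (ts : List String) :
    pvATowelLoop cs i dp ts =
      if ∃ t ∈ ts, (PySem.Str.len t ≤ i ∧ PySem.List.slice cs (some (i - PySem.Str.len t)) (some i) = t.toList) ∧
          PySem.List.pyGetD dp (i - PySem.Str.len t) false = true
      then PySem.List.pySetD dp i true else dp := by
  induction ts with
  | nil => simp [pvATowelLoop]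
  | cons t rest ih =>
    simp only [pvATowelLoop]
    rw [ih]
    simp only [List.exists_mem_cons_iff]
    by_cases h1 : PySem.Str.len t ≤ i ∧ PySem.List.slice cs (some (i - PySem.Str.len t)) (some i) = t.toList
    · by_cases h2 : PySem.List.pyGetD dp (i - PySem.Str.len t) false = true
      · rw [if_pos h1, if_pos h2, if_pos (Or.inl ⟨h1, h2⟩)]
      · rw [if_pos h1, if_neg h2]
        by_cases h3 : ∃ u ∈ rest,
            (PySem.Str.len u ≤ i ∧ PySem.List.slice cs (some (i - PySem.Str.len u)) (some i) = u.toList) ∧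
              PySem.List.pyGetD dp (i - PySem.Str.len u) false = true
        · rw [if_pos h3, if_pos (Or.inr h3)]
        · rw [if_neg h3, if_neg ?_]
          rintro (⟨_, hc⟩ | h)
          · exact h2 hc
          · exact h3 h
    · rw [if_neg h1]
      by_cases h3 : ∃ u ∈ rest,
          (PySem.Str.len u ≤ i ∧ PySem.List.slice cs (some (i - PySem.Str.len u)) (some i) = u.toList) ∧
            PySem.List.pyGetD dp (i - PySem.Str.len u) false = true
      · rw [if_pos h3, if_pos (Or.inr h3)]
      · rw [if_neg h3, if_neg ?_]
        rintro (⟨hc, _⟩ | h)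
        · exact h1 hc
        · exact h3 h

def pvDpInv (tps : List String) (cs : List Char) (i : Nat) (dp : List Bool) : Prop :=
  dp.length = cs.length + 1 ∧
    ∀ j : Nat, (dp.getD j false = true ↔ j = 0 ∨ (j < i ∧ pvReach tps cs j))

theorem pvStrLen_eq (t : String) : PySem.Str.len t = (t.toList.length : Int) := by
  simp [PySem.Str.len_eq]

-- the Int-level condition A tests for one towel, in Nat terms
theorem pvACondElem_iff (cs : List Char) (k : Nat) (dp : List Bool) (t : String) :
    ((PySem.Str.len t ≤ ((k : Int) + 1) ∧
        PySem.List.slice cs (some (((k : Int) + 1) - PySem.Str.len t)) (some ((k : Int) + 1)) = t.toList) ∧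
      PySem.List.pyGetD dp (((k : Int) + 1) - PySem.Str.len t) false = true)
    ↔ (t.toList.length ≤ k + 1 ∧ t.toList <+: cs.drop (k + 1 - t.toList.length) ∧
        dp.getD (k + 1 - t.toList.length) false = true) := by
  rw [pvStrLen_eq]
  constructor
  · rintro ⟨⟨htl, hsl⟩, hdp⟩
    have hLk : t.toList.length ≤ k + 1 := by exact_mod_cast htl
    have hcast : ((k : Int) + 1) - (t.toList.length : Int) = ((k + 1 - t.toList.length : Nat) : Int) := by omega
    rw [hcast, PySem.List.pyGetD_natCast] at hdp
    rw [hcast, show ((k : Int) + 1) = ((k + 1 : Nat) : Int) by omega, PySem.List.slice_natCast,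
      show k + 1 - (k + 1 - t.toList.length) = t.toList.length by omega] at hsl
    have hpre := List.take_prefix t.toList.length (cs.drop (k + 1 - t.toList.length))
    rw [hsl] at hpre
    exact ⟨hLk, hpre, hdp⟩
  · rintro ⟨hLk, hpre, hdp⟩
    have hcast : ((k : Int) + 1) - (t.toList.length : Int) = ((k + 1 - t.toList.length : Nat) : Int) := by omega
    refine ⟨⟨by exact_mod_cast hLk, ?_⟩, ?_⟩
    · rw [hcast, show ((k : Int) + 1) = ((k + 1 : Nat) : Int) by omega, PySem.List.slice_natCast,
        show k + 1 - (k + 1 - t.toList.length) = t.toList.length by omega]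
      exact (List.prefix_iff_eq_take.mp hpre).symm
    · rw [hcast, PySem.List.pyGetD_natCast]
      exact hdp

-- the towel-loop condition at position k+1 is exactly reachability of k+1, given the invariant
theorem pvACond_iff (tps : List String) (cs : List Char) (k : Nat) (dp : List Bool)
    (hinv : pvDpInv tps cs (k + 1) dp) :
    (∃ t ∈ PySem.Set.ofList tps,
        (PySem.Str.len t ≤ ((k : Int) + 1) ∧
          PySem.List.slice cs (some (((k : Int) + 1) - PySem.Str.len t)) (some ((k : Int) + 1)) = t.toList) ∧
        PySem.List.pyGetD dp (((k : Int) + 1) - PySem.Str.len t) false = true)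
      ↔ pvReach tps cs (k + 1) := by
  obtain ⟨hlen, hmem⟩ := hinv
  constructor
  · rintro ⟨t, ht, hc⟩
    rw [PySem.Set.mem_ofList] at ht
    obtain ⟨hLk, hpre, hdp⟩ := (pvACondElem_iff cs k dp t).mp hc
    have hLpos : 0 < t.toList.length := by
      by_contra h0
      have hL0 : t.toList.length = 0 := by omega
      rw [hL0, Nat.sub_zero] at hdp
      rcases (hmem (k + 1)).mp hdp with h | ⟨hlt, _⟩ <;> omega
    have hrj : pvReach tps cs (k + 1 - t.toList.length) := by
      rcases (hmem (k + 1 - t.toList.length)).mp hdp with h0 | ⟨_, hr⟩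
      · rw [h0]; exact .zero
      · exact hr
    have hne : t.toList ≠ [] := List.ne_nil_of_length_pos hLpos
    have := pvReach.step (k + 1 - t.toList.length) t hrj ht hne hpre
    rwa [show k + 1 - t.toList.length + t.toList.length = k + 1 by omega] at this
  · intro h
    obtain ⟨t, ht, hne, htl, hpre, hrj⟩ := pvReach_inv tps cs (k + 1) (by omega) h
    have hLpos := List.length_pos_of_ne_nil hne
    refine ⟨t, (PySem.Set.mem_ofList tps t).mpr ht, (pvACondElem_iff cs k dp t).mpr ⟨htl, hpre, ?_⟩⟩
    exact (hmem (k + 1 - t.toList.length)).mpr (Or.inr ⟨by omega, hrj⟩)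

theorem pvAStep (tps : List String) (cs : List Char) (k : Nat) (dp : List Bool)
    (hk : k < cs.length) (hinv : pvDpInv tps cs (k + 1) dp) :
    pvDpInv tps cs (k + 2) (pvATowelLoop cs ((k : Int) + 1) dp (PySem.Set.ofList tps)) := by
  rw [pvATowelLoop_eq]
  obtain ⟨hlen, hmem⟩ := hinv
  by_cases hc : pvReach tps cs (k + 1)
  · rw [if_pos ((pvACond_iff tps cs k dp ⟨hlen, hmem⟩).mpr hc)]
    rw [show ((k : Int) + 1) = ((k + 1 : Nat) : Int) by omega, PySem.List.pySetD_natCast]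
    refine ⟨by simp [hlen], ?_⟩
    intro j
    by_cases hj : j = k + 1
    · subst hj
      rw [List.getD_eq_getElem?_getD, List.getElem?_set_self (by omega)]
      exact ⟨fun _ => Or.inr ⟨by omega, hc⟩, fun _ => rfl⟩
    · rw [List.getD_eq_getElem?_getD, List.getElem?_set_ne (by omega), ← List.getD_eq_getElem?_getD]
      rw [hmem j]
      constructor
      · rintro (h0 | ⟨hlt, hr⟩)
        · exact Or.inl h0
        · exact Or.inr ⟨by omega, hr⟩
      · rintro (h0 | ⟨hlt, hr⟩)
        · exact Or.inl h0
        · exact Or.inr ⟨by omega, hr⟩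
  · rw [if_neg (fun h => hc ((pvACond_iff tps cs k dp ⟨hlen, hmem⟩).mp h))]
    refine ⟨hlen, ?_⟩
    intro j
    rw [hmem j]
    constructor
    · rintro (h0 | ⟨hlt, hr⟩)
      · exact Or.inl h0
      · exact Or.inr ⟨by omega, hr⟩
    · rintro (h0 | ⟨hlt, hr⟩)
      · exact Or.inl h0
      · refine Or.inr ⟨?_, hr⟩
        by_cases hj : j = k + 1
        · exact absurd (hj ▸ hr) hc
        · omega

theorem pvALoop (tps : List String) (cs : List Char) (m : Nat) (hm : m ≤ cs.length) :
    pvDpInv tps cs (m + 1)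
      ((List.range m).foldl (fun dp (k : Nat) => pvATowelLoop cs ((k : Int) + 1) dp (PySem.Set.ofList tps))
        ((List.replicate (cs.length + 1) false).set 0 true)) := by
  induction m with
  | zero =>
    simp only [List.range_zero, List.foldl_nil]
    refine ⟨by simp, ?_⟩
    intro j
    match j with
    | 0 =>
      rw [List.getD_eq_getElem?_getD, List.getElem?_set_self (by simp)]
      simp
    | p + 1 =>
      rw [List.getD_eq_getElem?_getD, List.getElem?_set_ne (by omega)]
      by_cases hp : p + 1 < cs.length + 1
      · rw [List.getElem?_replicate_of_lt hp]
        simp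
      · rw [List.getElem?_eq_none (by simpa using by omega)]
        simp
  | succ m ih =>
    rw [List.range_succ, List.foldl_append, List.foldl_cons, List.foldl_nil]
    exact pvAStep tps cs m _ (by omega) (ih (by omega))

theorem pvADesign_iff (tps : List String) (d : String) :
    pvADesign (PySem.Set.ofList tps) d = true ↔ pvReach tps d.toList d.toList.length := by
  unfold pvADesign
  rw [pvStrLen_eq]
  have hrange : PySem.List.pyRange 1 ((d.toList.length : Int) + 1) 1 =
      (List.range d.toList.length).map (fun (k : Nat) => (k : Int) + 1) := by
    rw [PySem.List.pyRange_one]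
    rw [show ((d.toList.length : Int) + 1 - 1).toNat = d.toList.length by omega]
    apply List.map_congr_left
    intro k _
    omega
  have hdp0 : PySem.List.pySetD (PySem.List.pyRepeat [false] ((d.toList.length : Int) + 1)) 0 true =
      (List.replicate (d.toList.length + 1) false).set 0 true := by
    rw [PySem.List.pyRepeat_singleton,
      show ((d.toList.length : Int) + 1) = ((d.toList.length + 1 : Nat) : Int) by omega,
      Int.toNat_natCast, show ((0 : Int)) = ((0 : Nat) : Int) by rfl, PySem.List.pySetD_natCast]
  rw [hrange, hdp0, List.foldl_map]
  obtain ⟨hl, hmem⟩ := pvALoop tps d.toList d.toList.length (le_refl _)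
  rw [PySem.List.pyGetD_natCast, hmem d.toList.length]
  constructor
  · rintro (h0 | ⟨_, hr⟩)
    · rw [h0]; exact .zero
    · exact hr
  · intro h
    exact Or.inr ⟨by omega, h⟩

-- ---------- B side ----------

def pvPats (tps : List String) : PySem.Set String := PySem.Set.ofList (tps.filter (fun t => t ≠ ""))

def pvLens (tps : List String) : List Nat :=
  PySem.List.sorted (PySem.Set.ofList ((pvPats tps).map (fun t => t.toList.length))) (fun x => x) false

theorem pvPats_mem (tps : List String) (t : String) :
    t ∈ pvPats tps ↔ t ∈ tps ∧ t.toList ≠ [] := by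
  rw [pvPats, PySem.Set.mem_ofList, List.mem_filter]
  simp only [decide_eq_true_eq, ne_eq, String.toList_eq_nil_iff]

theorem pvLens_mem (tps : List String) (l : Nat) :
    l ∈ pvLens tps ↔ ∃ t ∈ pvPats tps, t.toList.length = l := by
  rw [pvLens, PySem.List.mem_sorted, PySem.Set.mem_ofList, List.mem_map]

theorem pvBLenLoop_mem (pats : PySem.Set String) (cs : List Char) (i : Nat) (reach : PySem.Set Nat)
    (ls : List Nat) (j : Nat) :
    j ∈ pvBLenLoop pats cs i reach ls ↔
      j ∈ reach ∨ ∃ l ∈ ls, (i + l ≤ cs.length ∧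
        PySem.Set.contains pats (String.ofList ((cs.drop i).take l)) = true) ∧ j = i + l := by
  induction ls generalizing reach with
  | nil => simp [pvBLenLoop]
  | cons l rest ih =>
    simp only [pvBLenLoop, ih, List.exists_mem_cons_iff]
    by_cases hc : i + l ≤ cs.length ∧ PySem.Set.contains pats (String.ofList ((cs.drop i).take l)) = true
    · rw [if_pos hc, PySem.Set.mem_add]
      constructor
      · rintro ((h | rfl) | ⟨u, hu, hc'⟩)
        · exact Or.inl h
        · exact Or.inr (Or.inl ⟨hc, rfl⟩)
        · exact Or.inr (Or.inr ⟨u, hu, hc'⟩)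
      · rintro (h | (⟨_, rfl⟩ | ⟨u, hu, hc'⟩))
        · exact Or.inl (Or.inl h)
        · exact Or.inl (Or.inr rfl)
        · exact Or.inr ⟨u, hu, hc'⟩
    · rw [if_neg hc]
      constructor
      · rintro (h | ⟨u, hu, hc'⟩)
        · exact Or.inl h
        · exact Or.inr (Or.inr ⟨u, hu, hc'⟩)
      · rintro (h | (⟨hc', rfl⟩ | ⟨u, hu, hc'⟩))
        · exact Or.inl h
        · exact absurd hc' hc
        · exact Or.inr ⟨u, hu, hc'⟩

-- the length-loop push condition at position i is exactly "some nonempty towel matches as a prefix"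
theorem pvBCond_iff (tps : List String) (cs : List Char) (i j : Nat) :
    (∃ l ∈ pvLens tps, (i + l ≤ cs.length ∧
        PySem.Set.contains (pvPats tps) (String.ofList ((cs.drop i).take l)) = true) ∧ j = i + l) ↔
      (∃ t ∈ tps, t.toList ≠ [] ∧ t.toList <+: cs.drop i ∧ j = i + t.toList.length) := by
  constructor
  · rintro ⟨l, hl, ⟨hle, hcont⟩, rfl⟩
    have hmem : String.ofList ((cs.drop i).take l) ∈ pvPats tps := by
      simpa [PySem.Set.contains] using hcont
    obtain ⟨htps, hne⟩ := (pvPats_mem tps _).mp hmem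
    have htl : (String.ofList ((cs.drop i).take l)).toList = (cs.drop i).take l := String.toList_ofList
    have hlen : (String.ofList ((cs.drop i).take l)).toList.length = l := by
      rw [htl]
      simp only [List.length_take, List.length_drop]
      omega
    refine ⟨String.ofList ((cs.drop i).take l), htps, hne, ?_, by rw [hlen]⟩
    rw [htl]
    exact List.take_prefix _ _
  · rintro ⟨t, ht, hne, hp, rfl⟩
    have hmemp : t ∈ pvPats tps := (pvPats_mem tps t).mpr ⟨ht, hne⟩
    refine ⟨t.toList.length, (pvLens_mem tps _).mpr ⟨t, hmemp, rfl⟩, ⟨?_, ?_⟩, rfl⟩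
    · have := hp.length_le
      rw [List.length_drop] at this
      have hpos := List.length_pos_of_ne_nil hne
      omega
    · rw [← List.prefix_iff_eq_take.mp hp, String.ofList_toList]
      simpa [PySem.Set.contains] using hmemp

theorem pvBStep (tps : List String) (cs : List Char) (i : Nat) (reach : PySem.Set Nat)
    (hinv : ∀ j, j ∈ reach ↔ pvReachVia tps cs i j) (j : Nat) :
    j ∈ (if PySem.Set.contains reach i then pvBLenLoop (pvPats tps) cs i reach (pvLens tps) else reach) ↔
      pvReachVia tps cs (i + 1) j := by
  rw [pvReachVia_succ_iff]
  have hcont : PySem.Set.contains reach i = true ↔ i ∈ reach := by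
    simp [PySem.Set.contains]
  by_cases hi : PySem.Set.contains reach i = true
  · rw [if_pos hi, pvBLenLoop_mem]
    have hii : pvReachVia tps cs i i := (hinv i).mp (hcont.mp hi)
    rw [pvBCond_iff tps cs i j]
    constructor
    · rintro (h | ⟨t, ht, hne, hp, rfl⟩)
      · exact Or.inl ((hinv j).mp h)
      · exact Or.inr ⟨hii, t, ht, hne, hp, rfl⟩
    · rintro (h | ⟨_, t, ht, hne, hp, rfl⟩)
      · exact Or.inl ((hinv j).mpr h)
      · exact Or.inr ⟨t, ht, hne, hp, rfl⟩
  · rw [if_neg hi, hinv j]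
    constructor
    · exact Or.inl
    · rintro (h | ⟨hii, _⟩)
      · exact h
      · exact absurd (hcont.mpr ((hinv i).mpr hii)) hi

theorem pvBLoop (tps : List String) (cs : List Char) (m : Nat) (j : Nat) :
    j ∈ (List.range m).foldl
        (fun r i => if PySem.Set.contains r i then pvBLenLoop (pvPats tps) cs i r (pvLens tps) else r)
        (PySem.Set.ofList [0]) ↔ pvReachVia tps cs m j := by
  induction m generalizing j with
  | zero =>
    rw [pvReachVia_zero_iff]
    simp only [List.range_zero, List.foldl_nil, PySem.Set.mem_ofList, List.mem_singleton]
  | succ m ih =>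
    rw [List.range_succ, List.foldl_append, List.foldl_cons, List.foldl_nil]
    exact pvBStep tps cs m _ ih j

theorem pvBDesign_iff (tps : List String) (d : String) :
    pvBDesign (pvPats tps) (pvLens tps) d = true ↔ pvReach tps d.toList d.toList.length := by
  unfold pvBDesign
  rw [← pvReachVia_length_iff]
  have h := pvBLoop tps d.toList d.toList.length d.toList.length
  constructor
  · intro hc
    exact h.mp (by simpa [PySem.Set.contains] using hc)
  · intro hr
    simpa [PySem.Set.contains] using h.mpr hr

-- ---------- combination ----------

theorem pvDesign_agree (tps : List String) (d : String) :
    pvADesign (PySem.Set.ofList tps) d = pvBDesign (pvPats tps) (pvLens tps) d := by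
  rw [Bool.eq_iff_iff, pvADesign_iff, pvBDesign_iff]

theorem pvFold_agree (tps : List String) (designs : List String) (acc : Int) :
    designs.foldl (fun c d => if pvADesign (PySem.Set.ofList tps) d then c + 1 else c) acc =
      designs.foldl (fun c d => if pvBDesign (pvPats tps) (pvLens tps) d then c + 1 else c) acc := by
  induction designs generalizing acc with
  | nil => rfl
  | cons d rest ih =>
    simp only [List.foldl_cons, pvDesign_agree tps d]
    exact ih _

-- ===== VERDICT (by name: the statement is the Claim_ definition above) =====
theorem count_possible_designs_spec : Claim_equal_count_possible_designs := by
  intro tps designs _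
  unfold Spec_count_possible_designs count_possible_designs count_possible_designs_alt
  exact pvFold_agree tps designs 0
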